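-- pv_equiv track=rewrite | github.com/UNIVAC1219/Battleship | uppercase_converter.py | convert_string_to_uppercase_content
-- ===== SOURCE A (Python) =====
-- def convert_string_to_uppercase_content(content):
--     """
--     Convert string content to uppercase.
--     Preserves format specifiers like %s, %d, %c, etc.
--     Preserves escape sequences like \n, \t, etc.
--     Skips filenames and paths.
--     """
--     # Skip if it's a filename or path
--     if '.h' in content or '.c' in content or '/' in content or '\\\\' in content:
--         return content
--
--     # Convert to uppercase while preserving format specifiers and escape sequences
--     result = ""
--     i = 0
--     while i < len(content):
--         if content[i] == '%' and i + 1 < len(content):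
--             # Preserve format specifier exactly as-is
--             result += content[i]
--             i += 1
--             # Handle the format character(s)
--             while i < len(content) and content[i] in 'sdcfxXeEgGpnui-+ #0123456789.lLhz':
--                 result += content[i]
--                 i += 1
--         elif content[i] == '\\' and i + 1 < len(content):
--             # Preserve escape sequences exactly as-is
--             result += content[i:i+2]
--             i += 2
--         else:
--             # Convert regular characters to uppercase
--             result += content[i].upper()
--             i += 1
--
--     return result
-- ===== SOURCE B (Python) =====
-- def convert_string_to_uppercase_content(content):
--     # Skip if it's a filename or path
--     if '.h' in content or '.c' in content or '/' in content or '\\\\' in content: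
--         return content
--     FMT = frozenset('sdcfxXeEgGpnui-+ #0123456789.lLhz')
--     up = content.upper()
--     n = len(content)
--     parts = []
--     i = 0  # start of the current plain run
--     j = 0  # scan position
--     while j < n:
--         c = content[j]
--         if c == '%':
--             k = j + 1
--             while k < n and content[k] in FMT:
--                 k += 1
--             parts.append(up[i:j])
--             parts.append(content[j:k])
--             i = j = k
--         elif c == '\\' and j + 1 < n:
--             parts.append(up[i:j])
--             parts.append(content[j:j + 2])
--             i = j = j + 2
--         else:
--             j += 1
--     parts.append(up[i:])
--     return ''.join(parts)
-- ===== Notes on version B (the rewrite author's own statement) =====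
-- stated objective: faster
-- what changed: Replaces A's per-character while loop with string += by one bulk content.upper() plus a scan that splices verbatim %-specifier/escape slices between uppercased plain-run slices, joined at the end.
import Mathlib
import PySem

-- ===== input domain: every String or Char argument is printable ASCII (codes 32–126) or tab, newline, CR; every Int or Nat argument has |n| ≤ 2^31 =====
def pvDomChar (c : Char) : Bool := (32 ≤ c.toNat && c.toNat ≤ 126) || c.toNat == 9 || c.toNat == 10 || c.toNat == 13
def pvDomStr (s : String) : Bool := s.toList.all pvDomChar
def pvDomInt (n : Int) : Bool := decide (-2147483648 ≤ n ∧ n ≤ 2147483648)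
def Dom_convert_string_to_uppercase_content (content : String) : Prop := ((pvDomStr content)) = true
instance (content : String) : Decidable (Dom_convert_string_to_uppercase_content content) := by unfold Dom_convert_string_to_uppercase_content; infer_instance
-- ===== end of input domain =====

-- B replaces A's per-character while loop with a bulk upper() plus splicing of preserved %/escape slices (objective: faster by constant factor; return value proved equal).

-- format-specifier character class, the literal string both Pythons contain
def pvFmtChars : List Char := "sdcfxXeEgGpnui-+ #0123456789.lLhz".toList

-- ===== PORT A =====
-- A's while loop over the index, as structural recursion on the remaining characters;
-- the inner format-specifier while loop is the takeWhile/dropWhile split.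
def pvGoA : List Char → List Char
  | [] => []
  | '%' :: d :: rest =>
      '%' :: ((d :: rest).takeWhile (fun c => pvFmtChars.contains c) ++
              pvGoA ((d :: rest).dropWhile (fun c => pvFmtChars.contains c)))
  | '\\' :: d :: rest => '\\' :: d :: pvGoA rest
  | c :: rest => PySem.Chars.upperChar c :: pvGoA rest
termination_by l => l.length
decreasing_by
  all_goals simp only [List.length_cons]
  all_goals first
    | omega
    | (have := List.length_dropWhile_le (fun c => pvFmtChars.contains c) (d :: rest);
       simp only [List.length_cons] at this; omega)

def convert_string_to_uppercase_content (content : String) : String :=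
  if PySem.Str.isIn ".h" content || PySem.Str.isIn ".c" content ||
     PySem.Str.isIn "/" content || PySem.Str.isIn "\\\\" content then content
  else String.ofList (pvGoA content.toList)

-- ===== PORT B =====
-- B's single scan collecting parts: uppercased plain runs (run, held reversed) spliced
-- with verbatim %-specifier and escape slices; ''.join(parts) is the final flatten.
def pvPartsB : List Char → List Char → List (List Char)
  | run, [] => [run.reverse]
  | run, '%' :: rest =>
      run.reverse :: ('%' :: rest.takeWhile (fun c => pvFmtChars.contains c)) ::
        pvPartsB [] (rest.dropWhile (fun c => pvFmtChars.contains c))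
  | run, '\\' :: d :: rest => run.reverse :: ['\\', d] :: pvPartsB [] rest
  | run, c :: rest => pvPartsB (PySem.Chars.upperChar c :: run) rest
termination_by _ l => l.length
decreasing_by
  all_goals simp only [List.length_cons]
  all_goals first
    | omega
    | (have := List.length_dropWhile_le (fun c => pvFmtChars.contains c) rest;
       omega)

def convert_string_to_uppercase_content_alt (content : String) : String :=
  if PySem.Str.isIn ".h" content || PySem.Str.isIn ".c" content ||
     PySem.Str.isIn "/" content || PySem.Str.isIn "\\\\" content then content
  else String.ofList (pvPartsB [] content.toList).flatten

-- ===== PRECONDITION & SPEC =====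
def Spec_convert_string_to_uppercase_content (content : String) (out : String) : Prop := out = convert_string_to_uppercase_content_alt content
instance (content : String) (out : String) : Decidable (Spec_convert_string_to_uppercase_content content out) := by unfold Spec_convert_string_to_uppercase_content; infer_instance

-- ===== CLAIM (what is proved, stated in full; the proofs are below) =====
def Claim_equal_convert_string_to_uppercase_content : Prop := ∀ (content : String), Dom_convert_string_to_uppercase_content content → Spec_convert_string_to_uppercase_content content (convert_string_to_uppercase_content content)

-- ===== LEMMAS AND PROOFS =====
lemma pvGoA_pct (rest : List Char) :
    pvGoA ('%' :: rest) =
      '%' :: (rest.takeWhile (fun c => pvFmtChars.contains c) ++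
              pvGoA (rest.dropWhile (fun c => pvFmtChars.contains c))) := by
  cases rest with
  | nil => simp [pvGoA]; decide
  | cons d r => simp [pvGoA]

lemma pvPartsB_flatten (run l : List Char) :
    (pvPartsB run l).flatten = run.reverse ++ pvGoA l := by
  induction run, l using pvPartsB.induct with
  | case1 run => simp [pvPartsB, pvGoA]
  | case2 run rest ih => simp [pvPartsB, pvGoA_pct]; simpa using ih
  | case3 run d rest ih => simp [pvPartsB, pvGoA, ih]
  | case4 run c rest h1 h2 ih =>
      rw [pvPartsB]
      · rw [pvGoA]
        · rw [ih]; simp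
        · exact fun _ _ hc _ => h1 hc
        · exact h2
      · exact h1
      · exact h2

-- ===== VERDICT (by name: the statement is the Claim_ definition above) =====
theorem convert_string_to_uppercase_content_spec : Claim_equal_convert_string_to_uppercase_content := by
  intro content _
  unfold Spec_convert_string_to_uppercase_content convert_string_to_uppercase_content convert_string_to_uppercase_content_alt
  split_ifs with h
  · rfl
  · rw [pvPartsB_flatten]; simp
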